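-- pv_equiv track=rewrite | github.com/981377660LMT/algorithm-study | 7_graph/环检测/基环树/AcWing 358. 岛屿-基环树最长链-带权图.py | calMax2
-- ===== SOURCE A (Python) =====
-- from collections import defaultdict, deque
-- from typing import DefaultDict, List, Set, Tuple
--
-- def calMax2(scores: List[int], dists: List[int]) -> int:
--     """环上求depth[x]+depth[y]+preSum[x]-preSum[y]的最大值
--
--     环上每个点i求出i前面n−1个点中使得depth[j]-j最大的点(其实求出值即可)
--     """
--     n = len(scores)
--     res = 0
--     scores *= 2  # 破环成链
--     preSum = [0]
--     for i in range(n):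
--         preSum.append(preSum[-1] + dists[i])
--     for i in range(n):
--         preSum.append(preSum[-1] + dists[i])
--
--     maxQueue = deque()
--     for i in range(2 * n):
--         while maxQueue and maxQueue[0][1] <= i - n:
--             maxQueue.popleft()
--         if maxQueue:
--             res = max(res, scores[i] + preSum[i] + maxQueue[0][0])
--         while maxQueue and maxQueue[-1][0] < (scores[i] - preSum[i]):
--             maxQueue.pop()
--         maxQueue.append([scores[i] - preSum[i], i])
--     return res
-- ===== SOURCE B (Python) =====
-- def calMax2(scores, dists):
--     n = len(scores)
--     res = 0
--     scores *= 2  # same in-place doubling as the original (mutates the argument)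
--     preSum = [0]
--     for i in range(n):
--         preSum.append(preSum[-1] + dists[i])
--     for i in range(n):
--         preSum.append(preSum[-1] + dists[i])
--     # naive double scan instead of the monotonic deque
--     for i in range(2 * n):
--         for j in range(max(0, i - n + 1), i):
--             cand = scores[i] + preSum[i] + scores[j] - preSum[j]
--             if cand > res:
--                 res = cand
--     return res
-- ===== Notes on version B (the rewrite author's own statement) =====
-- stated objective: simpler
-- what changed: Replaces the monotonic deque (sliding-window maximum) of A's main loop with a plain nested scan: for each i, B directly maximizes over the window j in [max(0, i-n+1), i); the doubling of scores and the preSum construction are unchanged.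
import Mathlib
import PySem

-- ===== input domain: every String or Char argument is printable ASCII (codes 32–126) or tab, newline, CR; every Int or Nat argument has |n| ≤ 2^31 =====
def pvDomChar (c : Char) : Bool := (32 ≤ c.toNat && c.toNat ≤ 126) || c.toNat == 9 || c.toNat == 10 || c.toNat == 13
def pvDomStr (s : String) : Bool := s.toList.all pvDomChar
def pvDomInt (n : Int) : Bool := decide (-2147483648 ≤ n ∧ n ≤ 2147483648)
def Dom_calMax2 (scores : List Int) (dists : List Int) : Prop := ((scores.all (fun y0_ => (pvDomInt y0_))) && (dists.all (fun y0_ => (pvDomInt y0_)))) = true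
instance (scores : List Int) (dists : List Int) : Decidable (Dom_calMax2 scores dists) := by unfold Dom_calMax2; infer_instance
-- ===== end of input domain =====

-- B replaces A's monotonic-deque sliding-window maximum by a plain nested scan over the
-- window (objective: simpler; O(n^2) instead of O(n)).  Both A and B mutate the `scores`
-- argument in place (scores *= 2); the equivalence proved here is about the return value.

-- ===== PORT A =====
-- while maxQueue and maxQueue[0][1] <= i - n: maxQueue.popleft()
def pvPopFront (q : List (Int × Int)) (b : Int) : List (Int × Int) :=
  match q with
  | [] => []
  | e :: rest => if e.2 ≤ b then pvPopFront rest b else e :: rest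

-- while maxQueue and maxQueue[-1][0] < v: maxQueue.pop()
def pvPopBack (q : List (Int × Int)) (v : Int) : List (Int × Int) :=
  match q with
  | [] => []
  | e :: rest =>
    match pvPopBack rest v with
    | [] => if e.1 < v then [] else [e]
    | r => e :: r

-- one iteration of A's main loop (state = (res, maxQueue))
def pvStepA (s2 ps : List Int) (n : Int) (st : Int × List (Int × Int)) (i : Int) :
    Int × List (Int × Int) :=
  let q1 := pvPopFront st.2 (i - n)
  let res :=
    match q1 with
    | [] => st.1
    | e :: _ => max st.1 (PySem.List.pyGetD s2 i 0 + PySem.List.pyGetD ps i 0 + e.1)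
  let key := PySem.List.pyGetD s2 i 0 - PySem.List.pyGetD ps i 0
  (res, pvPopBack q1 key ++ [(key, i)])

def calMax2 (scores : List Int) (dists : List Int) : Int :=
  let n : Int := scores.length
  let s2 := scores ++ scores          -- scores *= 2
  let ps1 := (PySem.List.pyRange 0 n 1).foldl
    (fun ps i => ps ++ [PySem.List.pyGetD ps (-1) 0 + PySem.List.pyGetD dists i 0]) [0]
  let ps := (PySem.List.pyRange 0 n 1).foldl
    (fun ps i => ps ++ [PySem.List.pyGetD ps (-1) 0 + PySem.List.pyGetD dists i 0]) ps1
  ((PySem.List.pyRange 0 (2 * n) 1).foldl (pvStepA s2 ps n) (0, [])).1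

-- ===== PORT B =====
-- inner loop of B: for j in range(max(0, i-n+1), i): if cand > res: res = cand
def pvInnerB (s2 ps : List Int) (n : Int) (res : Int) (i : Int) : Int :=
  (PySem.List.pyRange (max 0 (i - n + 1)) i 1).foldl
    (fun r j =>
      let cand := PySem.List.pyGetD s2 i 0 + PySem.List.pyGetD ps i 0 +
        PySem.List.pyGetD s2 j 0 - PySem.List.pyGetD ps j 0
      if r < cand then cand else r) res

def calMax2_alt (scores : List Int) (dists : List Int) : Int :=
  let n : Int := scores.length
  let s2 := scores ++ scores          -- scores *= 2
  let ps1 := (PySem.List.pyRange 0 n 1).foldl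
    (fun ps i => ps ++ [PySem.List.pyGetD ps (-1) 0 + PySem.List.pyGetD dists i 0]) [0]
  let ps := (PySem.List.pyRange 0 n 1).foldl
    (fun ps i => ps ++ [PySem.List.pyGetD ps (-1) 0 + PySem.List.pyGetD dists i 0]) ps1
  (PySem.List.pyRange 0 (2 * n) 1).foldl (pvInnerB s2 ps n) 0

-- ===== PRECONDITION & SPEC =====
-- Pre_ excludes exactly the inputs where Python A raises IndexError (dists[i] with
-- len(dists) < len(scores)); B raises there too.
def Pre_calMax2 (scores : List Int) (dists : List Int) : Prop :=
  scores.length ≤ dists.length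
instance (scores : List Int) (dists : List Int) : Decidable (Pre_calMax2 scores dists) := by
  unfold Pre_calMax2; infer_instance

def pvWitness_calMax2 : List Int × List Int := ([1, 2, 3], [4, 1, 2])

def Spec_calMax2 (scores : List Int) (dists : List Int) (out : Int) : Prop := out = calMax2_alt scores dists
instance (scores : List Int) (dists : List Int) (out : Int) : Decidable (Spec_calMax2 scores dists out) := by unfold Spec_calMax2; infer_instance

-- ===== CLAIM (what is proved, stated in full; the proofs are below) =====
def Claim_equal_calMax2 : Prop := ∀ (scores : List Int) (dists : List Int), Dom_calMax2 scores dists → Pre_calMax2 scores dists → Spec_calMax2 scores dists (calMax2 scores dists)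

-- ===== LEMMAS AND PROOFS =====

-- abbreviations for the two per-index quantities both programs use
def pvK (s2 ps : List Int) (i : Int) : Int :=
  PySem.List.pyGetD s2 i 0 - PySem.List.pyGetD ps i 0
def pvC (s2 ps : List Int) (i : Int) : Int :=
  PySem.List.pyGetD s2 i 0 + PySem.List.pyGetD ps i 0

-- the deque invariant after k steps of A's loop
def pvInv (s2 ps : List Int) (n k : Int) (q : List (Int × Int)) : Prop :=
  q.Pairwise (fun a b => a.2 < b.2 ∧ b.1 ≤ a.1) ∧
  (∀ e ∈ q, e.1 = pvK s2 ps e.2 ∧ 0 ≤ e.2 ∧ e.2 < k) ∧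
  (∀ j : Int, 0 ≤ j → k - n ≤ j → j < k → ∃ e ∈ q, j ≤ e.2 ∧ pvK s2 ps j ≤ e.1)

theorem pvPopFront_split (q : List (Int × Int)) (b : Int) :
    ∃ pre, q = pre ++ pvPopFront q b ∧ ∀ e ∈ pre, e.2 ≤ b := by
  induction q with
  | nil => exact ⟨[], rfl, by simp⟩
  | cons e rest ih =>
    by_cases h : e.2 ≤ b
    · obtain ⟨pre, hp, hle⟩ := ih
      exact ⟨e :: pre, by simp [pvPopFront, h, ← hp], by
        intro x hx; rcases List.mem_cons.1 hx with rfl | hx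
        · exact h
        · exact hle x hx⟩
    · exact ⟨[], by simp [pvPopFront, h], by simp⟩

theorem pvPopFront_head (q : List (Int × Int)) (b : Int) (e : Int × Int)
    (rest : List (Int × Int)) (h : pvPopFront q b = e :: rest) : b < e.2 := by
  induction q with
  | nil => simp [pvPopFront] at h
  | cons x xs ih =>
    rw [pvPopFront] at h
    split at h
    · exact ih h
    · next hx =>
      injection h with h1 h2
      subst h1
      omega

theorem pvPopBack_split (q : List (Int × Int)) (v : Int) :
    ∃ suf, q = pvPopBack q v ++ suf ∧ ∀ e ∈ suf, e.1 < v := by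
  induction q with
  | nil => exact ⟨[], rfl, by simp⟩
  | cons e rest ih =>
    obtain ⟨suf, hs, hlt⟩ := ih
    cases hr : pvPopBack rest v with
    | nil =>
      by_cases h : e.1 < v
      · refine ⟨e :: rest, ?_, ?_⟩
        · simp [pvPopBack, hr, h]
        · intro x hx
          rcases List.mem_cons.1 hx with rfl | hx
          · exact h
          · rw [hs, hr] at hx
            exact hlt x (by simpa using hx)
      · refine ⟨suf, ?_, hlt⟩
        conv_lhs => rw [hs, hr]
        rw [pvPopBack, hr]
        simp [h]
    | cons y ys =>
      refine ⟨suf, ?_, hlt⟩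
      conv_lhs => rw [hs, hr]
      rw [pvPopBack, hr]
      simp

theorem pvPopBack_ge (q : List (Int × Int)) (v : Int)
    (hp : q.Pairwise (fun a b => a.2 < b.2 ∧ b.1 ≤ a.1)) :
    ∀ e ∈ pvPopBack q v, v ≤ e.1 := by
  induction q with
  | nil => simp [pvPopBack]
  | cons e rest ih =>
    have hrest := ih (List.Pairwise.of_cons hp)
    intro x hx
    cases hr : pvPopBack rest v with
    | nil =>
      rw [pvPopBack, hr] at hx
      by_cases h : e.1 < v
      · simp [h] at hx
      · simp [h] at hx; subst hx; omega
    | cons y ys =>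
      rw [pvPopBack, hr] at hx
      rcases List.mem_cons.1 hx with rfl | hx
      · -- x = e : y is kept, y ∈ rest, pairwise gives y.1 ≤ e.1, and v ≤ y.1
        have hy : y ∈ pvPopBack rest v := by rw [hr]; simp
        have hv : v ≤ y.1 := hrest y hy
        have hyr : y ∈ rest := by
          obtain ⟨suf, hs, _⟩ := pvPopBack_split rest v
          rw [hs]; exact List.mem_append_left _ hy
        have := (List.pairwise_cons.1 hp).1 y hyr
        omega
      · exact hrest x (by rw [hr]; exact hx)

-- fold of "if r < g j then g j else r" over a list with max v attained
theorem pvFold_le (g : Int → Int) (l : List Int) (v a : Int)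
    (hub : ∀ j ∈ l, g j ≤ v) :
    l.foldl (fun r j => if r < g j then g j else r) (max a v) = max a v := by
  induction l generalizing a with
  | nil => rfl
  | cons j l ih =>
    have h1 : g j ≤ v := hub j (by simp)
    have hstep : (if max a v < g j then g j else max a v) = max a v := by
      split <;> omega
    simp only [List.foldl_cons]
    rw [hstep]
    exact ih a (fun x hx => hub x (by simp [hx]))

theorem pvFold_max (g : Int → Int) (l : List Int) (v a : Int)
    (hub : ∀ j ∈ l, g j ≤ v) (hwit : ∃ j ∈ l, g j = v) :
    l.foldl (fun r j => if r < g j then g j else r) a = max a v := by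
  induction l generalizing a with
  | nil => simp at hwit
  | cons j l ih =>
    have h1 : g j ≤ v := hub j (by simp)
    have hstep : (if a < g j then g j else a) = max a (g j) := by split <;> omega
    by_cases hw : ∃ x ∈ l, g x = v
    · have := ih (max a (g j)) (fun x hx => hub x (by simp [hx])) hw
      simp only [List.foldl_cons]
      rw [hstep, this]
      omega
    · have hj : g j = v := by
        rcases hwit with ⟨x, hx, hxv⟩
        rcases List.mem_cons.1 hx with rfl | hx
        · exact hxv
        · exact absurd ⟨x, hx, hxv⟩ hw
      simp only [List.foldl_cons]
      rw [hstep, hj]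
      exact pvFold_le g l v a (fun x hx => hub x (by simp [hx]))

-- one step of A's loop preserves the invariant and computes B's inner loop
theorem pvStep_lemma (s2 ps : List Int) (n k : Int) (hk : 0 ≤ k)
    (st : Int × List (Int × Int)) (hInv : pvInv s2 ps n k st.2) :
    pvInv s2 ps n (k + 1) (pvStepA s2 ps n st k).2 ∧
    (pvStepA s2 ps n st k).1 = pvInnerB s2 ps n st.1 k := by
  obtain ⟨hPW, hMem, hCov⟩ := hInv
  set q1 := pvPopFront st.2 (k - n) with hq1
  obtain ⟨pre, hpre, hpreLe⟩ := pvPopFront_split st.2 (k - n)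
  have hq1suf : q1 <:+ st.2 := ⟨pre, hpre.symm⟩
  have hq1sub : List.Sublist q1 st.2 := hq1suf.sublist
  have hq1PW : q1.Pairwise (fun a b => a.2 < b.2 ∧ b.1 ≤ a.1) := hPW.sublist hq1sub
  have hq1Mem : ∀ e ∈ q1, e ∈ st.2 := fun e he => hq1sub.mem he
  -- membership transfer into q1 for non-stale entries
  have hkeep : ∀ e ∈ st.2, k - n < e.2 → e ∈ q1 := by
    intro e he hgt
    rw [hpre] at he
    rcases List.mem_append.1 he with h | h
    · exact absurd (hpreLe e h) (by omega)
    · exact h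
  have hkey : (PySem.List.pyGetD s2 k 0 - PySem.List.pyGetD ps k 0) = pvK s2 ps k := rfl
  have hC : ∀ x, (PySem.List.pyGetD s2 k 0 + PySem.List.pyGetD ps k 0 + x)
      = pvC s2 ps k + x := fun x => rfl
  constructor
  · -- invariant at k+1
    obtain ⟨suf, hsuf, hsufLt⟩ := pvPopBack_split q1 (pvK s2 ps k)
    have hpbSub : List.Sublist (pvPopBack q1 (pvK s2 ps k)) q1 := by
      conv_rhs => rw [hsuf]
      exact List.sublist_append_left _ _
    have hpbMem : ∀ e ∈ pvPopBack q1 (pvK s2 ps k), e ∈ st.2 :=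
      fun e he => hq1Mem e (hpbSub.mem he)
    have hpbGe := pvPopBack_ge q1 (pvK s2 ps k) hq1PW
    refine ⟨?_, ?_, ?_⟩
    · -- pairwise
      show ((pvStepA s2 ps n st k).2).Pairwise _
      simp only [pvStepA, hkey]
      rw [List.pairwise_append]
      refine ⟨hq1PW.sublist hpbSub, by simp, ?_⟩
      intro a ha b hb
      simp at hb; subst hb
      exact ⟨(hMem a (hpbMem a ha)).2.2, hpbGe a ha⟩
    · -- bounds/values
      intro e he
      simp only [pvStepA, hkey] at he
      rcases List.mem_append.1 he with h | h
      · obtain ⟨h1, h2, h3⟩ := hMem e (hpbMem e h)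
        exact ⟨h1, h2, by omega⟩
      · simp at h; subst h
        exact ⟨rfl, hk, by omega⟩
    · -- coverage
      intro j hj0 hjlo hjhi
      by_cases hjk : j = k
      · subst hjk
        exact ⟨(pvK s2 ps j, j), by simp [pvStepA, hkey], le_refl _, le_refl _⟩
      · have hjk' : j < k := by omega
        obtain ⟨e, he, hje, hKe⟩ := hCov j hj0 (by omega) hjk'
        have he1 : e ∈ q1 := hkeep e he (by omega)
        rw [hsuf] at he1
        rcases List.mem_append.1 he1 with h | h
        · exact ⟨e, by simp [pvStepA, hkey]; exact Or.inl h, hje, hKe⟩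
        · -- popped: dominated by the new entry
          have := hsufLt e h
          exact ⟨(pvK s2 ps k, k), by simp [pvStepA, hkey], by omega, by omega⟩
  · -- the res produced equals B's inner loop
    show (pvStepA s2 ps n st k).1 = _
    cases hq : q1 with
    | nil =>
      -- window empty
      have hwin : PySem.List.pyRange (max 0 (k - n + 1)) k 1 = [] := by
        apply PySem.List.pyRange_one_eq_nil
        by_contra hcon
        push_neg at hcon
        have h0k : 0 < k := lt_of_le_of_lt (le_max_left _ _) hcon
        have hnk : k - n + 1 < k := lt_of_le_of_lt (le_max_right _ _) hcon
        obtain ⟨e, he, hje, hKe⟩ := hCov (k - 1) (by omega) (by omega) (by omega)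
        have := hkeep e he (by omega)
        rw [hq] at this
        simp at this
      simp [pvStepA, ← hq1, hq, pvInnerB, hwin]
    | cons h t =>
      have hh1 : h ∈ q1 := by rw [hq]; simp
      have hhq : h ∈ st.2 := hq1Mem h hh1
      obtain ⟨hhK, hh0, hhk⟩ := hMem h hhq
      have hhgt : k - n < h.2 := pvPopFront_head st.2 (k - n) h t (by rw [← hq1, hq])
      -- B's inner fold = max st.1 (pvC k + h.1)
      have hres : pvInnerB s2 ps n st.1 k = max st.1 (pvC s2 ps k + h.1) := by
        unfold pvInnerB
        have : ∀ r j, (let cand := PySem.List.pyGetD s2 k 0 + PySem.List.pyGetD ps k 0 +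
            PySem.List.pyGetD s2 j 0 - PySem.List.pyGetD ps j 0
            if r < cand then cand else r)
            = (fun r j => if r < pvC s2 ps k + pvK s2 ps j then pvC s2 ps k + pvK s2 ps j else r) r j := by
          intro r j
          simp only [pvC, pvK]
          ring_nf
        simp only [this]
        apply pvFold_max
        · -- upper bound over the window
          intro j hj
          rw [PySem.List.mem_pyRange_one] at hj
          obtain ⟨e, he, hje, hKe⟩ := hCov j (le_trans (le_max_left _ _) hj.1)
            (by have := le_trans (le_max_right _ _) hj.1; omega) hj.2
          have he1 : e ∈ q1 := hkeep e he (by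
            have := le_trans (le_max_right _ _) hj.1; omega)
          rw [hq] at he1
          rcases List.mem_cons.1 he1 with rfl | he1
          · omega
          · have := (List.pairwise_cons.1 (by rwa [hq] at hq1PW)).1 e he1
            omega
        · -- attained at j = h.2
          refine ⟨h.2, ?_, by rw [hhK]⟩
          rw [PySem.List.mem_pyRange_one]
          constructor
          · omega
          · exact hhk
      rw [hres]
      simp [pvStepA, ← hq1, hq, hC]

-- the full fold: A's state satisfies the invariant and res matches B step by step
theorem pvMain (s2 ps : List Int) (n : Int) (m : Nat) :
    pvInv s2 ps n m (((PySem.List.pyRange 0 (m : Int) 1).foldl (pvStepA s2 ps n) (0, [])).2) ∧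
    ((PySem.List.pyRange 0 (m : Int) 1).foldl (pvStepA s2 ps n) (0, [])).1
      = (PySem.List.pyRange 0 (m : Int) 1).foldl (pvInnerB s2 ps n) 0 := by
  induction m with
  | zero =>
    refine ⟨⟨by simp [PySem.List.pyRange_one_eq_nil], ?_, ?_⟩, by simp⟩ <;>
      simp [PySem.List.pyRange_one_eq_nil] <;> omega
  | succ m ih =>
    have hr : PySem.List.pyRange 0 ((m : Int) + 1) 1
        = PySem.List.pyRange 0 (m : Int) 1 ++ [(m : Int)] :=
      PySem.List.pyRange_one_succ_right (by positivity)
    obtain ⟨hInv, hres⟩ := ih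
    have hstep := pvStep_lemma s2 ps n (m : Int) (by positivity)
      ((PySem.List.pyRange 0 (m : Int) 1).foldl (pvStepA s2 ps n) (0, [])) hInv
    constructor
    · push_cast
      rw [hr, List.foldl_append]
      simpa using hstep.1
    · push_cast
      rw [hr, List.foldl_append, List.foldl_append]
      simp only [List.foldl_cons, List.foldl_nil]
      rw [hstep.2, hres]

-- ===== VERDICT (by name: the statement is the Claim_ definition above) =====
theorem calMax2_spec : Claim_equal_calMax2 := by
  intro scores dists _ _
  unfold Spec_calMax2 calMax2 calMax2_alt
  have h2 : (2 * (scores.length : Int)) = ((2 * scores.length : Nat) : Int) := by push_cast; ring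
  simp only [h2]
  exact (pvMain _ _ _ (2 * scores.length)).2
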